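-- pv_equiv track=rewrite | github.com/garretts-hub/GST_Work | helpers.py | select_tuples
-- ===== SOURCE A (Python) =====
-- def select_tuples(sorted_list_of_tuples, x_values_list):
--     #picks out N-tuples from the N-length values list
--     #picks out the tuples whose x-value is in x_values_list
--     tuples_of_interest = []
--     for x in x_values_list:
--         difference_list = [] #a list that will be filled with abs(x - tup[0]) for all tuples
--         for tup in sorted_list_of_tuples:
--             difference_list.append(abs(x - tup[0]))
--         index_of_closest_x = difference_list.index(min(difference_list))
--         tuples_of_interest.append(sorted_list_of_tuples[index_of_closest_x])
--     return tuples_of_interest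
-- ===== SOURCE B (Python) =====
-- def select_tuples(sorted_list_of_tuples, x_values_list):
--     # One-pass running-argmin per query: keeps (best, best_d) instead of
--     # materialising a difference list and re-scanning it with min() and .index().
--     result = []
--     for x in x_values_list:
--         best = sorted_list_of_tuples[0]
--         best_d = abs(x - best[0])
--         for tup in sorted_list_of_tuples[1:]:
--             d = abs(x - tup[0])
--             if d < best_d:
--                 best, best_d = tup, d
--         result.append(best)
--     return result
-- ===== Notes on version B (the rewrite author's own statement) =====
-- stated objective: alternative
-- what changed: B replaces A's three passes per query (build a full difference list, min() over it, .index() scan, then index back into the list) by a single running-argmin pass that keeps the current best tuple and best distance; the difference list disappears.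
import Mathlib
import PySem

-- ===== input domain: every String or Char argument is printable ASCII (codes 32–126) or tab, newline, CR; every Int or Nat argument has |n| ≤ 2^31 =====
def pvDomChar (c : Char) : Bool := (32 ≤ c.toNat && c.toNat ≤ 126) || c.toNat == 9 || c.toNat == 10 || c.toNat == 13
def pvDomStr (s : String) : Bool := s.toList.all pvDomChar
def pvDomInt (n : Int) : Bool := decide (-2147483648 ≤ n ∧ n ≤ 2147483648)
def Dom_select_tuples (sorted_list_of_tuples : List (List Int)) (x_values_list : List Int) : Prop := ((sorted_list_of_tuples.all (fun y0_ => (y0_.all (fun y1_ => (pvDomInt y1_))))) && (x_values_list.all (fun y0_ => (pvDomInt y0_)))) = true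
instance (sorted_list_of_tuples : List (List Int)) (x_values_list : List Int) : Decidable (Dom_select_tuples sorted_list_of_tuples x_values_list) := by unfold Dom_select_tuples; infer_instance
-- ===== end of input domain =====

-- B replaces A's three passes per query (difference list, min(), .index()) by one
-- running-argmin pass keeping (best, best_d); same asymptotic cost, O(1) extra space.

-- ===== PORT A =====
def select_tuples (sorted_list_of_tuples : List (List Int)) (x_values_list : List Int) : List (List Int) :=
  x_values_list.foldl (fun tuples_of_interest x =>
    let difference_list :=
      sorted_list_of_tuples.foldl
        (fun dl tup => dl ++ [|x - PySem.List.pyGetD tup 0 0|]) ([] : List Int)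
    let m := (PySem.List.min? difference_list (fun y => y)).getD 0
    let index_of_closest_x := ((PySem.List.index? difference_list m).getD 0 : Nat)
    tuples_of_interest ++ [PySem.List.pyGetD sorted_list_of_tuples (index_of_closest_x : Int) []]) []

-- ===== PORT B =====
def select_tuples_alt (sorted_list_of_tuples : List (List Int)) (x_values_list : List Int) : List (List Int) :=
  x_values_list.foldl (fun result x =>
    let best := PySem.List.pyGetD sorted_list_of_tuples 0 []
    let best_d := |x - PySem.List.pyGetD best 0 0|
    let p := (PySem.List.slice sorted_list_of_tuples (some 1) none).foldl
        (fun (s : List Int × Int) tup =>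
          let d := |x - PySem.List.pyGetD tup 0 0|
          if d < s.2 then (tup, d) else s) (best, best_d)
    result ++ [p.1]) []

-- ===== PRECONDITION & SPEC =====
-- Pre_ excludes exactly the inputs on which the Python A raises: a query list that is
-- nonempty while the tuple list is empty (min() of an empty sequence, ValueError), or a
-- nonempty query list with some empty tuple (tup[0], IndexError).
def Pre_select_tuples (sorted_list_of_tuples : List (List Int)) (x_values_list : List Int) : Prop :=
  x_values_list = [] ∨ (sorted_list_of_tuples ≠ [] ∧ ∀ t ∈ sorted_list_of_tuples, t ≠ [])
instance (sorted_list_of_tuples : List (List Int)) (x_values_list : List Int) : Decidable (Pre_select_tuples sorted_list_of_tuples x_values_list) := by unfold Pre_select_tuples; infer_instance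
def pvWitness_select_tuples : List (List Int) × List Int := ([[1, 10], [3, 20], [7, 30]], [2, 8, -1])

def Spec_select_tuples (sorted_list_of_tuples : List (List Int)) (x_values_list : List Int) (out : List (List Int)) : Prop := out = select_tuples_alt sorted_list_of_tuples x_values_list
instance (sorted_list_of_tuples : List (List Int)) (x_values_list : List Int) (out : List (List Int)) : Decidable (Spec_select_tuples sorted_list_of_tuples x_values_list out) := by unfold Spec_select_tuples; infer_instance

-- ===== CLAIM (what is proved, stated in full; the proofs are below) =====
def Claim_equal_select_tuples : Prop := ∀ (sorted_list_of_tuples : List (List Int)) (x_values_list : List Int), Dom_select_tuples sorted_list_of_tuples x_values_list → Pre_select_tuples sorted_list_of_tuples x_values_list → Spec_select_tuples sorted_list_of_tuples x_values_list (select_tuples sorted_list_of_tuples x_values_list)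

-- ===== LEMMAS AND PROOFS =====

theorem pv_foldl_min_le (l : List Int) : ∀ a : Int, l.foldl min a ≤ a := by
  induction l with
  | nil => intro a; simp
  | cons b l ih => intro a; exact le_trans (ih (min a b)) (min_le_left a b)

theorem pv_foldl_min_mem (l : List Int) : ∀ a : Int, l.foldl min a = a ∨ l.foldl min a ∈ l := by
  induction l with
  | nil => intro a; simp
  | cons b l ih =>
    intro a
    have e : List.foldl min a (b :: l) = List.foldl min (min a b) l := rfl
    rcases ih (min a b) with h | h
    · rcases le_total a b with h2 | h2
      · left; rw [e, h, min_eq_left h2]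
      · right; rw [e, h, min_eq_right h2]; simp
    · right; rw [e]; simp [h]

-- the per-query core: first index of the minimum vs running argmin
theorem pv_key (f : List Int → Int) : ∀ (ts : List (List Int)) (t : List Int),
    (t :: ts).getD ((((t :: ts).map f).idxOf? ((ts.map f).foldl min (f t))).getD 0) [] =
    (ts.foldl (fun (s : List Int × Int) tup => if f tup < s.2 then (tup, f tup) else s) (t, f t)).1 := by
  intro ts
  induction ts with
  | nil => intro t; simp
  | cons u us ih =>
    intro t
    simp only [List.map_cons, List.foldl_cons]
    by_cases h : f u < f t
    · rw [min_eq_right (le_of_lt h), if_pos h]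
      have hle : (us.map f).foldl min (f u) ≤ f u := pv_foldl_min_le _ _
      have hne : f t ≠ (us.map f).foldl min (f u) := by intro e; omega
      have hmem : (us.map f).foldl min (f u) ∈ f u :: us.map f := by
        rcases pv_foldl_min_mem (us.map f) (f u) with h1 | h1
        · rw [h1]; exact List.mem_cons_self
        · exact List.mem_cons_of_mem _ h1
      have hsome : (f u :: us.map f).idxOf? ((us.map f).foldl min (f u)) ≠ none := by
        simp only [ne_eq, List.idxOf?_eq_none_iff, not_not]; exact hmem
      obtain ⟨k, hk⟩ := Option.ne_none_iff_exists'.mp hsome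
      have := ih u
      simp only [List.map_cons] at this
      rw [hk] at this
      rw [List.idxOf?_cons, if_neg (by simpa using hne), hk]
      simpa using this
    · rw [min_eq_left (le_of_not_gt h), if_neg h]
      have hIH := ih t
      simp only [List.map_cons] at hIH
      by_cases h0 : f t = (us.map f).foldl min (f t)
      · rw [List.idxOf?_cons, if_pos (by simpa using h0)]
        rw [List.idxOf?_cons, if_pos (by simpa using h0)] at hIH
        simpa using hIH
      · have hle : (us.map f).foldl min (f t) ≤ f t := pv_foldl_min_le _ _
        have hlt : (us.map f).foldl min (f t) < f t := lt_of_le_of_ne hle (fun e => h0 e.symm)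
        have hneu : f u ≠ (us.map f).foldl min (f t) := by
          have := le_of_not_gt h; intro e; omega
        have hmem : (us.map f).foldl min (f t) ∈ us.map f := by
          rcases pv_foldl_min_mem (us.map f) (f t) with h1 | h1
          · exact absurd h1.symm h0
          · exact h1
        have hsome : (us.map f).idxOf? ((us.map f).foldl min (f t)) ≠ none := by
          simp only [ne_eq, List.idxOf?_eq_none_iff, not_not]; exact hmem
        obtain ⟨k, hk⟩ := Option.ne_none_iff_exists'.mp hsome
        rw [List.idxOf?_cons, if_neg (by simpa using h0), List.idxOf?_cons,
            if_neg (by simpa using hneu), hk]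
        rw [List.idxOf?_cons, if_neg (by simpa using h0), hk] at hIH
        simpa using hIH

-- foldl with singleton appends is map
theorem pv_foldl_singleton {α β : Type} (g : α → β) (xs : List α) :
    ∀ acc : List β, xs.foldl (fun acc x => acc ++ [g x]) acc = acc ++ xs.map g := by
  induction xs with
  | nil => intro acc; simp
  | cons x xs ih => intro acc; simp [ih]

theorem select_tuples_spec : Claim_equal_select_tuples := by
  intro lst xs _dom hpre
  unfold Spec_select_tuples
  rcases hpre with hxs | ⟨hne, _htup⟩
  · subst hxs; rfl
  · obtain ⟨t, ts, rfl⟩ := List.exists_cons_of_ne_nil hne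
    unfold select_tuples select_tuples_alt
    rw [pv_foldl_singleton, pv_foldl_singleton]
    simp only [List.nil_append]
    apply List.map_congr_left
    intro x _hx
    rw [pv_foldl_singleton]
    simp only [List.nil_append, PySem.List.min?_id_cons, List.map_cons, Option.getD_some,
      PySem.List.index?_eq_idxOf?, PySem.List.pyGetD_natCast, PySem.List.slice_from_one, List.tail_cons,
      PySem.List.pyGetD_zero_cons]
    exact pv_key (fun tup => |x - PySem.List.pyGetD tup 0 0|) ts t
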